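-- pv_equiv track=rewrite | github.com/goeom77/algorithm | 프로그래머스/2/389479. 서버 증설 횟수/서버 증설 횟수.py | solution
-- ===== SOURCE A (Python) =====
-- def solution(players, m, k):
--     # players + m >= m * room > players
--     # k시간 유지
--     # 최소 방 개설 횟수 출력
--     q = [0]*len(players)
--     answer = 0
--     day = 0
--     for player in players:
--         if int(player/m) > q[day]:
--             add_value = int(player/m) - q[day]
--             # 각 날짜에 추가하기
--             for i in range(k):
--                 if (day + i) >= len(players):
--                     break
--                 q[day+i] += add_value
--             answer += add_value
--         day += 1
--     return answer
-- ===== SOURCE B (Python) =====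
-- def solution(players, m, k):
--     # O(n) sliding window: track the currently active added servers and
--     # expire each batch exactly k hours after it was added.
--     n = len(players)
--     adds = [0] * n
--     active = 0
--     answer = 0
--     for day, p in enumerate(players):
--         if k > 0 and day >= k:
--             active -= adds[day - k]
--         need = int(p / m)
--         if need > active:
--             add = need - active
--             answer += add
--             if k > 0:
--                 adds[day] = add
--                 active += add
--     return answer
-- ===== Notes on version B (the rewrite author's own statement) =====
-- stated objective: faster
-- what changed: Replaced A's inner loop that re-adds each server batch to the next k slots of an array (O(n*k)) by a single-pass sliding window that keeps a running count of active added servers and subtracts each batch exactly when it expires (O(n)).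
import Mathlib
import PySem

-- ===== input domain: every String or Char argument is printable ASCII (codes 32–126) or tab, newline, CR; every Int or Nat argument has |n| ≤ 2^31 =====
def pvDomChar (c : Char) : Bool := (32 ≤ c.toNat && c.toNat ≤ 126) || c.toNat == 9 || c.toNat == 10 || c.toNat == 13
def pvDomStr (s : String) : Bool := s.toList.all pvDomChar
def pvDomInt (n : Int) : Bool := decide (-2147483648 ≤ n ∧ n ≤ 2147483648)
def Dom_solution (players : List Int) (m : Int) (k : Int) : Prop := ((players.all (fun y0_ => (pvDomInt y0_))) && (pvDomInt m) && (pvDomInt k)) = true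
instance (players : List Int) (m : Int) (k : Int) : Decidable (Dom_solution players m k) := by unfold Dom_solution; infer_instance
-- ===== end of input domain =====

-- B is a one-pass sliding window (running active count with expiry) instead of A's
-- per-day re-addition to the next k array slots.
-- Note: `int(player/m)` (float division then truncation) is ported as Int.tdiv
-- (truncation toward zero); on the stated domain (|values| ≤ 2^31, m ≠ 0) the float
-- quotient never rounds across an integer, so this is exact.

-- ===== PORT A =====
-- inner loop: `for i in range(k): if day+i >= len(players): break; q[day+i] += add`
def aInner (n day : Nat) (add : Int) : List Int → Nat → Nat → List Int
  | q, _, 0 => q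
  | q, i, fuel+1 =>
    if day + i ≥ n then q
    else aInner n day add (q.set (day+i) (q.getD (day+i) 0 + add)) (i+1) fuel

def aLoop (m k : Int) (n : Nat) : List Int → List Int → Int → Nat → Int
  | [], _, answer, _ => answer
  | p :: rest, q, answer, day =>
    if p.tdiv m > q.getD day 0 then
      aLoop m k n rest (aInner n day (p.tdiv m - q.getD day 0) q 0 k.toNat)
        (answer + (p.tdiv m - q.getD day 0)) (day+1)
    else
      aLoop m k n rest q answer (day+1)

def solution (players : List Int) (m : Int) (k : Int) : Int :=
  aLoop m k players.length players (List.replicate players.length 0) 0 0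

-- ===== PORT B =====
def bLoop (m k : Int) : List Int → List Int → Int → Int → Nat → Int
  | [], _, _, answer, _ => answer
  | p :: rest, adds, active, answer, day =>
    let active2 := if 0 < k ∧ k ≤ (day:Int) then active - adds.getD (day - k.toNat) 0 else active
    if p.tdiv m > active2 then
      if 0 < k then
        bLoop m k rest (adds.set day (p.tdiv m - active2)) (active2 + (p.tdiv m - active2))
          (answer + (p.tdiv m - active2)) (day+1)
      else
        bLoop m k rest adds active2 (answer + (p.tdiv m - active2)) (day+1)
    else
      bLoop m k rest adds active2 answer (day+1)

def solution_alt (players : List Int) (m : Int) (k : Int) : Int :=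
  bLoop m k players (List.replicate players.length 0) 0 0 0

-- ===== PRECONDITION & SPEC =====
-- Pre_ excludes exactly m = 0 with nonempty players, where A raises ZeroDivisionError
-- (with players = [] the loop body never runs, so no division happens and A returns 0).
def Pre_solution (players : List Int) (m : Int) (k : Int) : Prop := players = [] ∨ m ≠ 0
instance (players : List Int) (m : Int) (k : Int) : Decidable (Pre_solution players m k) := by unfold Pre_solution; infer_instance
def pvWitness_solution : List Int × Int × Int := ([5, 10, 2], 3, 2)

def Spec_solution (players : List Int) (m : Int) (k : Int) (out : Int) : Prop := out = solution_alt players m k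
instance (players : List Int) (m : Int) (k : Int) (out : Int) : Decidable (Spec_solution players m k out) := by unfold Spec_solution; infer_instance

-- ===== CLAIM (what is proved, stated in full; the proofs are below) =====
def Claim_equal_solution : Prop := ∀ (players : List Int) (m : Int) (k : Int), Dom_solution players m k → Pre_solution players m k → Spec_solution players m k (solution players m k)

-- ===== LEMMAS AND PROOFS =====

-- W adds k day j: total add-capacity covering slot j, from batches added on days i < day.
def W (adds : List Int) (k : Int) (day j : Nat) : Int :=
  ∑ i ∈ Finset.range day, if i ≤ j ∧ (j:Int) < (i:Int) + k then adds.getD i 0 else 0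

-- V adds k day: B's `active` at entry of iteration `day` (batches not yet expired at day-1).
def V (adds : List Int) (k : Int) (day : Nat) : Int :=
  ∑ i ∈ Finset.range day, if (day:Int) ≤ (i:Int) + k then adds.getD i 0 else 0

theorem getD_set_lem (l : List Int) (i j : Nat) (a : Int) :
    (l.set i a).getD j 0 = if i = j ∧ i < l.length then a else l.getD j 0 := by
  simp only [List.getD, List.getElem?_set]
  by_cases h1 : i = j
  · subst h1
    by_cases h2 : i < l.length
    · simp [h2]
    · have hnone : l[i]? = none := by rw [List.getElem?_eq_none_iff]; omega
      simp [h2, hnone]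
  · simp [h1, fun h : i = j ∧ i < l.length => h1 h.1]

theorem aInner_length (n day : Nat) (add : Int) :
    ∀ (fuel i : Nat) (q : List Int), (aInner n day add q i fuel).length = q.length := by
  intro fuel
  induction fuel with
  | zero => intro i q; rfl
  | succ f ih =>
    intro i q
    unfold aInner
    split
    · rfl
    · rw [ih]; simp

theorem aInner_getD (n day : Nat) (add : Int) :
    ∀ (fuel i : Nat) (q : List Int), q.length = n → ∀ j,
      (aInner n day add q i fuel).getD j 0 =
        q.getD j 0 + if day + i ≤ j ∧ j < n ∧ j < day + i + fuel then add else 0 := by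
  intro fuel
  induction fuel with
  | zero =>
    intro i q hq j
    simp only [aInner]
    have : ¬ (day + i ≤ j ∧ j < n ∧ j < day + i + 0) := by omega
    rw [if_neg this]
    ring
  | succ f ih =>
    intro i q hq j
    unfold aInner
    split
    · rename_i h
      have : ¬ (day + i ≤ j ∧ j < n ∧ j < day + i + (f+1)) := by omega
      simp [this]
    · rename_i h
      push_neg at h
      rw [ih (i+1) _ (by simpa using hq) j]
      rw [getD_set_lem]
      by_cases hj : j = day + i
      · subst hj
        have h1 : ¬ (day + (i+1) ≤ day + i ∧ day + i < n ∧ day + i < day + (i+1) + f) := by omega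
        have h2 : day + i = day + i ∧ day + i < q.length := ⟨rfl, by omega⟩
        have h3 : day + i ≤ day + i ∧ day + i < n ∧ day + i < day + i + (f+1) := by omega
        rw [if_pos h2, if_neg h1, if_pos h3]
        ring
      · have h2 : ¬ (day + i = j ∧ day + i < q.length) := by
          intro ⟨h', _⟩; exact hj h'.symm
        have h4 : (day + (i+1) ≤ j ∧ j < n ∧ j < day + (i+1) + f) ↔
            (day + i ≤ j ∧ j < n ∧ j < day + i + (f+1)) := by omega
        rw [if_neg h2]
        by_cases h5 : day + i ≤ j ∧ j < n ∧ j < day + i + (f+1)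
        · rw [if_pos (h4.mpr h5), if_pos h5]
        · rw [if_neg (fun h => h5 (h4.mp h)), if_neg h5]

theorem W_zero (adds : List Int) (k : Int) (j : Nat) : W adds k 0 j = 0 := by
  simp [W]

theorem V_zero (adds : List Int) (k : Int) : V adds k 0 = 0 := by
  simp [V]

theorem W_set_lt (adds : List Int) (k : Int) (day j : Nat) (a : Int) :
    W (adds.set day a) k day j = W adds k day j := by
  unfold W
  refine Finset.sum_congr rfl (fun i hi => ?_)
  simp only [Finset.mem_range] at hi
  rw [getD_set_lem]
  have : ¬ (day = i ∧ day < adds.length) := by omega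
  simp [this]

theorem W_succ (adds : List Int) (k : Int) (day j : Nat) :
    W adds k (day+1) j = W adds k day j +
      (if day ≤ j ∧ (j:Int) < (day:Int) + k then adds.getD day 0 else 0) := by
  unfold W
  rw [Finset.sum_range_succ]

theorem V_succ_W (adds : List Int) (k : Int) (day : Nat) :
    V adds k (day+1) = W adds k day day +
      (if (day:Int) < (day:Int) + k then adds.getD day 0 else 0) := by
  unfold V W
  rw [Finset.sum_range_succ]
  congr 1
  · refine Finset.sum_congr rfl (fun i hi => ?_)
    simp only [Finset.mem_range] at hi
    by_cases h : (day:Int) < (i:Int) + k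
    · have h1 : (((day+1 : Nat)):Int) ≤ (i:Int) + k := by push_cast; omega
      have h2 : i ≤ day ∧ (day:Int) < (i:Int) + k := ⟨by omega, h⟩
      rw [if_pos h1, if_pos h2]
    · have h1 : ¬ ((((day+1 : Nat)):Int) ≤ (i:Int) + k) := by push_cast; omega
      have h2 : ¬ (i ≤ day ∧ (day:Int) < (i:Int) + k) := fun hh => h hh.2
      rw [if_neg h1, if_neg h2]

-- the expiry step turns the entry value V into W adds k day day (the coverage A reads at q[day])
theorem expiry_eq (adds : List Int) (k : Int) (day : Nat) (hlen : day < adds.length) :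
    (if 0 < k ∧ k ≤ (day:Int) then V adds k day - adds.getD (day - k.toNat) 0 else V adds k day)
      = W adds k day day := by
  by_cases hk : 0 < k
  · by_cases hd : k ≤ (day:Int)
    · have hkn : k.toNat ≤ day := by omega
      have hknk : (k.toNat : Int) = k := by omega
      simp only [hk, hd, and_self, if_true]
      rw [sub_eq_iff_eq_add]
      unfold V W
      have hstep : ∀ i ∈ Finset.range day,
          (if (day:Int) ≤ (i:Int) + k then adds.getD i 0 else 0) =
          ((if i ≤ day ∧ (day:Int) < (i:Int) + k then adds.getD i 0 else 0) +
           (if i = day - k.toNat then adds.getD i 0 else 0)) := by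
        intro i hi
        simp only [Finset.mem_range] at hi
        by_cases he : i = day - k.toNat
        · subst he
          have c1 : (day:Int) ≤ ((day - k.toNat : Nat):Int) + k := by push_cast; omega
          have c2 : ¬ ((day - k.toNat : Nat) ≤ day ∧ (day:Int) < ((day - k.toNat : Nat):Int) + k) := by
            push_cast; omega
          rw [if_pos c1, if_neg c2, if_pos rfl]
          ring
        · have hic : (i:Int) ≠ (day:Int) - k := by
            push_cast
            intro hh
            apply he
            omega
          by_cases c : (day:Int) < (i:Int) + k
          · have c1 : (day:Int) ≤ (i:Int) + k := by omega
            have c2 : i ≤ day ∧ (day:Int) < (i:Int) + k := ⟨by omega, c⟩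
            rw [if_pos c1, if_pos c2, if_neg he]
            ring
          · have c1 : ¬ ((day:Int) ≤ (i:Int) + k) := by omega
            have c2 : ¬ (i ≤ day ∧ (day:Int) < (i:Int) + k) := fun hh => c hh.2
            rw [if_neg c1, if_neg c2, if_neg he]
            ring
      rw [Finset.sum_congr rfl hstep, Finset.sum_add_distrib]
      congr 1
      rw [Finset.sum_ite_eq' (Finset.range day) (day - k.toNat) (fun i => adds.getD i 0)]
      have hmem : day - k.toNat ∈ Finset.range day := by
        simp only [Finset.mem_range]; omega
      rw [if_pos hmem]
    · have hcond : ¬ (0 < k ∧ k ≤ (day:Int)) := by tauto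
      simp only [hcond, if_false]
      unfold V W
      refine Finset.sum_congr rfl (fun i hi => ?_)
      simp only [Finset.mem_range] at hi
      have c : ((day:Int) ≤ (i:Int) + k) ↔ (i ≤ day ∧ (day:Int) < (i:Int) + k) := by
        constructor
        · intro h'
          refine ⟨by omega, by omega⟩
        · intro ⟨_, h'⟩; omega
      simp [c]
  · have hcond : ¬ (0 < k ∧ k ≤ (day:Int)) := by tauto
    simp only [hcond, if_false]
    unfold V W
    refine Finset.sum_congr rfl (fun i hi => ?_)
    simp only [Finset.mem_range] at hi
    have c1 : ¬ ((day:Int) ≤ (i:Int) + k) := by omega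
    have c2 : ¬ (i ≤ day ∧ (day:Int) < (i:Int) + k) := by
      intro ⟨_, h'⟩; omega
    simp [c1, c2]

theorem loop_eq (m k : Int) (n : Nat) :
    ∀ (rest : List Int) (day : Nat) (q adds : List Int) (active answer : Int),
      n = day + rest.length → q.length = n → adds.length = n →
      (∀ j, j < n → q.getD j 0 = W adds k day j) →
      active = V adds k day →
      (∀ i, day ≤ i → adds.getD i 0 = 0) →
      aLoop m k n rest q answer day = bLoop m k rest adds active answer day := by
  intro rest
  induction rest with
  | nil => intro day q adds active answer _ _ _ _ _ _; rfl
  | cons p rest ih =>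
    intro day q adds active answer hn hq hadds hinv hact hzero
    have hdayn : day < n := by simp at hn; omega
    have hdaya : day < adds.length := by omega
    -- B's active after the expiry step equals A's q[day]
    have hact2 : (if 0 < k ∧ k ≤ (day:Int) then active - adds.getD (day - k.toNat) 0 else active)
        = W adds k day day := by
      rw [hact]; exact expiry_eq adds k day hdaya
    have hqd : q.getD day 0 = W adds k day day := hinv day hdayn
    unfold aLoop bLoop
    simp only []
    rw [hact2, hqd]
    by_cases hgt : p.tdiv m > W adds k day day
    · simp only [hgt, if_true]
      by_cases hk : 0 < k
      · simp only [hk, if_true]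
        apply ih
        · simp at hn ⊢; omega
        · rw [aInner_length]; exact hq
        · simpa using hadds
        · -- q' invariant
          intro j hj
          rw [aInner_getD n day _ k.toNat 0 q hq j, W_succ, W_set_lt, hinv j hj, getD_set_lem]
          have hd2 : day = day ∧ day < adds.length := ⟨rfl, hdaya⟩
          rw [if_pos hd2]
          have hkc : ((k.toNat : Int)) = k := by omega
          have hcond : (day + 0 ≤ j ∧ j < n ∧ j < day + 0 + k.toNat) ↔
              (day ≤ j ∧ (j:Int) < (day:Int) + k) := by
            constructor
            · intro ⟨h1, _, h3⟩; refine ⟨by omega, by push_cast; omega⟩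
            · intro ⟨h1, h2⟩; refine ⟨by omega, hj, by omega⟩
          by_cases hc : day ≤ j ∧ (j:Int) < (day:Int) + k
          · rw [if_pos hc, if_pos (hcond.mpr hc)]
          · rw [if_neg hc, if_neg (fun h => hc (hcond.mp h))]
        · -- active invariant
          rw [V_succ_W, W_set_lt, getD_set_lem]
          have hd2 : day = day ∧ day < adds.length := ⟨rfl, hdaya⟩
          have hcond : (day:Int) < (day:Int) + k := by omega
          rw [if_pos hd2, if_pos hcond]
        · intro i hi
          rw [getD_set_lem]
          have hne : ¬ (day = i ∧ day < adds.length) := by omega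
          rw [if_neg hne]
          exact hzero i (by omega)
      · simp only [hk, if_false]
        have haInner : aInner n day (p.tdiv m - W adds k day day) q 0 k.toNat = q := by
          have : k.toNat = 0 := by omega
          rw [this]; rfl
        rw [haInner]
        apply ih
        · simp at hn ⊢; omega
        · exact hq
        · exact hadds
        · intro j hj
          rw [W_succ, hinv j hj, hzero day (le_refl day)]
          simp
        · rw [V_succ_W, hzero day (le_refl day)]
          simp
        · intro i hi; exact hzero i (by omega)
    · simp only [hgt, if_false]
      apply ih
      · simp at hn ⊢; omega
      · exact hq
      · exact hadds
      · intro j hj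
        rw [W_succ, hinv j hj, hzero day (le_refl day)]
        simp
      · rw [V_succ_W, hzero day (le_refl day)]
        simp
      · intro i hi; exact hzero i (by omega)

-- ===== VERDICT (by name: the statement is the Claim_ definition above) =====
theorem solution_spec : Claim_equal_solution := by
  intro players m k _ _
  unfold Spec_solution solution solution_alt
  apply loop_eq
  · simp
  · simp
  · simp
  · intro j hj
    rw [W_zero]
    simp only [List.getD, List.getElem?_replicate]
    split <;> rfl
  · rw [V_zero]
  · intro i _
    simp only [List.getD, List.getElem?_replicate]
    split <;> rfl
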